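-- pv_equiv track=rewrite | github.com/wuyaqiang/Algorithm_Learn | 笔试题 记录/春招/网易互娱 春招/NO_1.py | card
-- ===== SOURCE A (Python) =====
-- def card(card_seq, card_num):
--     count = 0
--     num_count = {}
--     card_seq.sort()
--     if card_num < 5 or card_seq[-1] - card_seq[0] < 4:
--         return count
--     for num in card_seq:
--         if num not in num_count:
--             num_count[num] = 1
--         else:
--             num_count[num] += 1
--
--     card_seq = sorted(list(set(card_seq)))
--     if len(card_seq) < 5:
--         return count
--
--     all_combine = []
--     for idx, num in enumerate(card_seq):
--         if card_seq[idx+1]==num+1 and card_seq[idx+2]==num+2 and card_seq[idx+3]==num+3 and card_seq[idx+4]==num+4: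
--             combine = [card_seq[idx], card_seq[idx+1], card_seq[idx+2], card_seq[idx+3], card_seq[idx+4]]
--             if combine not in all_combine:
--                 all_combine.append(combine)
--         if (idx+5)==len(card_seq):
--             break
--     multi = 1
--     for key, value in num_count.items():
--         multi *= value
--
--     count = multi * len(all_combine)
--
--     return count
-- ===== SOURCE B (Python) =====
-- def card(card_seq, card_num):
--     # Same in-place sort side effect as the original.
--     card_seq.sort()
--     if card_num < 5 or card_seq[-1] - card_seq[0] < 4:
--         return 0
--     counts = {}
--     for num in card_seq:
--         counts[num] = counts.get(num, 0) + 1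
--     product = 1
--     for v in counts.values():
--         product *= v
--     uniq = sorted(counts)
--     straights = 0
--     run = 1
--     for prev, cur in zip(uniq, uniq[1:]):
--         if cur == prev + 1:
--             run += 1
--         else:
--             straights += max(0, run - 4)
--             run = 1
--     straights += max(0, run - 4)
--     return product * straights
-- ===== Notes on version B (the rewrite author's own statement) =====
-- stated objective: simpler
-- what changed: Replaces the quadratic window scan with membership-deduplication (each 5-window rechecked against the list of all previous windows) by a single run-length pass over the deduplicated sorted values that adds max(0, L-4) straights per maximal consecutive run, and builds the count dict with get()+1 and a values() product.
import Mathlib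
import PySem

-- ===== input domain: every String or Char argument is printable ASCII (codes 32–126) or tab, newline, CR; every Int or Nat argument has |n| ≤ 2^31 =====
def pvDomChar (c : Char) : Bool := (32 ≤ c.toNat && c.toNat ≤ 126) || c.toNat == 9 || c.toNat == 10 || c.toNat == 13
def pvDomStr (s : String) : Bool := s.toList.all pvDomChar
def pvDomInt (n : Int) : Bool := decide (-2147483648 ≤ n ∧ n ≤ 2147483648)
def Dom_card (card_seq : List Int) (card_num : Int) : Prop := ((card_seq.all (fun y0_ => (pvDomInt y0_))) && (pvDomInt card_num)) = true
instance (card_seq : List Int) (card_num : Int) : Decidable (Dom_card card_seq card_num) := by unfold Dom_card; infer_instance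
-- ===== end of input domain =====

-- B replaces A's quadratic window scan (each 5-card window rechecked against the list of
-- previous windows) by one run-length pass over the deduplicated sorted values, and builds
-- the count dict with get()+1 and a values() product.  Both A and B sort card_seq in place;
-- the equivalence proved here is about the return value (the mutation is identical anyway).

-- ===== PORT A =====
-- the 'for idx, num in enumerate(card_seq): …' loop with its 'break' at idx+5 == len;
-- the '| _, _, _, _ => acc' arm is an IndexError, unreachable since len ≥ 5 makes the break fire first
def cardLoopA (u : List Int) : List (Int × Int) → List (List Int) → List (List Int)
  | [], acc => acc
  | (idx, num) :: rest, acc =>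
    let acc' :=
      match PySem.List.pyGet? u (idx + 1), PySem.List.pyGet? u (idx + 2),
            PySem.List.pyGet? u (idx + 3), PySem.List.pyGet? u (idx + 4) with
      | some a, some b, some c, some d =>
        if a = num + 1 ∧ b = num + 2 ∧ c = num + 3 ∧ d = num + 4 then
          -- combine = [card_seq[idx], …]; card_seq[idx] is num (enumerate)
          let combine : List Int := [num, a, b, c, d]
          if combine ∈ acc then acc else acc ++ [combine]
        else acc
      | _, _, _, _ => acc
    if idx + 5 = (u.length : Int) then acc' else cardLoopA u rest acc'

def card (card_seq : List Int) (card_num : Int) : Int :=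
  let s := PySem.List.sorted card_seq (fun x => x) false
  if card_num < 5 then 0
  else
    match PySem.List.pyGet? s (-1), PySem.List.pyGet? s 0 with
    | some last, some first =>
      if last - first < 4 then 0
      else
        let numCount := s.foldl
          (fun d n => if d.contains n then d.modify n 0 (· + 1) else d.insert n 1)
          (PySem.Dict.empty : PySem.Dict Int Int)
        let u := PySem.List.sorted (PySem.Set.ofList s) (fun x => x) false
        if (u.length : Int) < 5 then 0
        else
          let allCombine := cardLoopA u (PySem.List.enumerate u 0) []
          let multi := numCount.items.foldl (fun m p => m * p.2) 1
          multi * (allCombine.length : Int)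
    | _, _ => 0   -- card_seq = [] with card_num ≥ 5: IndexError in Python, outside Pre_card

-- ===== PORT B =====
def card_alt (card_seq : List Int) (card_num : Int) : Int :=
  let s := PySem.List.sorted card_seq (fun x => x) false
  if card_num < 5 then 0
  else
    match PySem.List.pyGet? s (-1), PySem.List.pyGet? s 0 with
    | some last, some first =>
      if last - first < 4 then 0
      else
        let counts := s.foldl (fun d n => d.insert n (d.getD n 0 + 1))
          (PySem.Dict.empty : PySem.Dict Int Int)
        let product := counts.values.foldl (fun m v => m * v) 1
        let uniq := PySem.List.sorted counts.keys (fun x => x) false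
        let st := (uniq.zip (PySem.List.slice uniq (some 1) none)).foldl
          (fun (p : Int × Int) (pr : Int × Int) =>
            if pr.2 = pr.1 + 1 then (p.1, p.2 + 1) else (p.1 + max 0 (p.2 - 4), 1))
          ((0 : Int), (1 : Int))
        product * (st.1 + max 0 (st.2 - 4))
    | _, _ => 0   -- card_seq = [] with card_num ≥ 5: IndexError in Python, outside Pre_card

-- ===== PRECONDITION & SPEC =====
-- Pre_card excludes only the inputs where the Python raises IndexError (both A and B do):
-- an empty card_seq with card_num ≥ 5 reaches card_seq[-1].
def Pre_card (card_seq : List Int) (card_num : Int) : Prop :=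
  card_num < 5 ∨ card_seq ≠ []
instance (card_seq : List Int) (card_num : Int) : Decidable (Pre_card card_seq card_num) := by
  unfold Pre_card; infer_instance
def pvWitness_card : List Int × Int := ([3, 1, 2, 5, 4, 3], 6)

def Spec_card (card_seq : List Int) (card_num : Int) (out : Int) : Prop := out = card_alt card_seq card_num
instance (card_seq : List Int) (card_num : Int) (out : Int) : Decidable (Spec_card card_seq card_num out) := by unfold Spec_card; infer_instance

-- ===== CLAIM (what is proved, stated in full; the proofs are below) =====
def Claim_equal_card : Prop := ∀ (card_seq : List Int) (card_num : Int), Dom_card card_seq card_num → Pre_card card_seq card_num → Spec_card card_seq card_num (card card_seq card_num)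

-- ===== LEMMAS AND PROOFS =====

-- straight count: number of 5-windows of consecutive values, written with A's indicator
def sc : List Int → Int
  | a :: b :: c :: d :: e :: t =>
      (if b = a + 1 ∧ c = a + 2 ∧ d = a + 3 ∧ e = a + 4 then 1 else 0) + sc (b :: c :: d :: e :: t)
  | _ => 0

-- the same count over the successor-flag list
def wc : List Bool → Int
  | a :: b :: c :: d :: t => (if a && b && c && d then 1 else 0) + wc (b :: c :: d :: t)
  | _ => 0

-- B's run-scan accumulator, recursively
def wcAux : List Bool → Int → Int
  | [], r => max 0 (r - 4)
  | true :: t, r => wcAux t (r + 1)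
  | false :: t, r => max 0 (r - 4) + wcAux t 1

lemma sc_short (u : List Int) (h : u.length < 5) : sc u = 0 := by
  rcases u with _|⟨a,_|⟨b,_|⟨c,_|⟨d,_|⟨e,t⟩⟩⟩⟩⟩ <;> simp_all [sc] <;> omega

lemma wc_false_cons (t : List Bool) : wc (false :: t) = wc t := by
  rcases t with _|⟨b,_|⟨c,_|⟨d,t'⟩⟩⟩ <;> simp [wc]

lemma wc_replicate (m : Nat) : wc (List.replicate m true) = max 0 ((m : Int) - 3) := by
  induction m using Nat.strong_induction_on with
  | _ m ih =>
    rcases m with _|_|_|_|m <;> simp [wc, List.replicate]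
    have h3 : List.replicate (m+3) true = true :: true :: true :: List.replicate m true := by
      simp [List.replicate_succ]
    rw [show true :: true :: true :: List.replicate m true = List.replicate (m+3) true from h3.symm,
        ih (m+3) (by omega)]
    push_cast; omega

lemma wc_split (m : Nat) (t : List Bool) :
    wc (List.replicate m true ++ false :: t) = wc (List.replicate m true) + wc t := by
  induction m using Nat.strong_induction_on with
  | _ m ih =>
    rcases m with _|_|_|_|m
    · simp [wc_false_cons, wc]
    · rcases t with _|⟨b,_|⟨c,t'⟩⟩ <;> simp [wc, wc_false_cons]
    · rcases t with _|⟨b,_|⟨c,t'⟩⟩ <;> simp [wc, wc_false_cons]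
    · rcases t with _|⟨b,_|⟨c,t'⟩⟩ <;> simp [wc, wc_false_cons]
    · have e1 : List.replicate (m+4) true ++ false :: t
          = true :: (List.replicate (m+3) true ++ false :: t) := by
        simp [List.replicate_succ]
      have e2 : List.replicate (m+3) true ++ false :: t
          = true :: true :: true :: (List.replicate m true ++ false :: t) := by
        simp [List.replicate_succ]
      rw [e1, e2, show wc (true :: (true :: true :: true :: (List.replicate m true ++ false :: t)))
          = 1 + wc (true :: true :: true :: (List.replicate m true ++ false :: t)) by simp [wc]]
      rw [← e2, ih (m+3) (by omega), wc_replicate, wc_replicate]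
      push_cast; omega

lemma wcAux_eq (d : List Bool) : ∀ r : Int, 1 ≤ r →
    wcAux d r = wc (List.replicate (r - 1).toNat true ++ d) := by
  induction d with
  | nil =>
    intro r hr
    simp [wcAux, wc_replicate]
    omega
  | cons x t ih =>
    intro r hr
    cases x
    · simp only [wcAux, wc_split, wc_replicate]
      rw [ih 1 le_rfl]
      simp
      omega
    · rw [wcAux, ih (r+1) (by omega)]
      have : List.replicate (r + 1 - 1).toNat true = List.replicate (r-1).toNat true ++ [true] := by
        rw [← List.replicate_succ']
        congr 1
        omega
      rw [this]
      simp

lemma sc_eq_wc (u : List Int) :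
    sc u = wc ((u.zip u.tail).map (fun pr => decide (pr.2 = pr.1 + 1))) := by
  induction u with
  | nil => simp [sc, wc]
  | cons a u' ih =>
    rcases u' with _|⟨b,_|⟨c,_|⟨d,_|⟨e,t⟩⟩⟩⟩
    · simp [sc, wc]
    · simp [sc, wc]
    · simp [sc, wc]
    · simp [sc, wc]
    · rw [sc, ih]
      simp only [List.tail_cons, List.zip_cons_cons, List.map_cons]
      rw [wc]
      congr 1
      by_cases h1 : b = a + 1 ∧ c = a + 2 ∧ d = a + 3 ∧ e = a + 4
      · rw [if_pos h1, if_pos (by simp; omega)]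
      · rw [if_neg h1, if_neg (by simp; omega)]

lemma bfold_total (ps : List (Int × Int)) : ∀ s r : Int, 1 ≤ r →
    (ps.foldl (fun (p : Int × Int) (pr : Int × Int) =>
          if pr.2 = pr.1 + 1 then (p.1, p.2 + 1) else (p.1 + max 0 (p.2 - 4), 1)) (s, r)).1
      + max 0 ((ps.foldl (fun (p : Int × Int) (pr : Int × Int) =>
          if pr.2 = pr.1 + 1 then (p.1, p.2 + 1) else (p.1 + max 0 (p.2 - 4), 1)) (s, r)).2 - 4)
    = s + wcAux (ps.map (fun pr => decide (pr.2 = pr.1 + 1))) r := by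
  induction ps with
  | nil => intro s r _; simp [wcAux]
  | cons x t ih =>
    intro s r hr
    simp only [List.foldl_cons, List.map_cons]
    by_cases h : x.2 = x.1 + 1
    · rw [if_pos h]
      rw [show decide (x.2 = x.1 + 1) = true by simp [h], wcAux]
      exact ih s (r+1) (by omega)
    · rw [if_neg h, show decide (x.2 = x.1 + 1) = false by simp [h]]
      rw [wcAux]
      rw [ih (s + max 0 (r-4)) 1 le_rfl]
      ring

lemma aLoop_len (v : List Int) : ∀ (pre : List Int) (acc : List (List Int)),
    (pre ++ v).Pairwise (· < ·) → 5 ≤ v.length →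
    (∀ l ∈ acc, ∃ z, l.head? = some z ∧ ∀ x ∈ v, z < x) →
    ((cardLoopA (pre ++ v) (PySem.List.enumerate v (pre.length : Int)) acc).length : Int)
      = (acc.length : Int) + sc v := by
  induction v with
  | nil => intro pre acc _ h5 _; simp at h5
  | cons n0 v' ih =>
    intro pre acc hpw h5 hacc
    rcases v' with _|⟨n1,_|⟨n2,_|⟨n3,_|⟨n4,t⟩⟩⟩⟩ <;> simp at h5
    have hvpw : (n0 :: n1 :: n2 :: n3 :: n4 :: t).Pairwise (· < ·) :=
      hpw.sublist (List.sublist_append_right _ _)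
    have hn0 : ∀ x ∈ n1 :: n2 :: n3 :: n4 :: t, n0 < x :=
      fun x hx => List.rel_of_pairwise_cons hvpw hx
    have g : ∀ (k : Nat), PySem.List.pyGet? (pre ++ n0::n1::n2::n3::n4::t) ((pre.length : Int) + ((k:Nat) : Int))
        = (n0::n1::n2::n3::n4::t)[k]? := fun k => PySem.List.pyGet?_append_right _ _ k
    have g1 := g 1; have g2 := g 2; have g3 := g 3; have g4 := g 4
    push_cast at g1 g2 g3 g4
    simp only [List.getElem?_cons_succ, List.getElem?_cons_zero] at g1 g2 g3 g4
    rw [PySem.List.enumerate_cons, cardLoopA]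
    simp only [g1, g2, g3, g4]
    have hnotin : [n0, n1, n2, n3, n4] ∉ acc := by
      intro hmem
      obtain ⟨z, hz, hlt⟩ := hacc _ hmem
      simp at hz
      have := hlt n0 (by simp)
      omega
    by_cases hbrk : t = []
    · subst hbrk
      rw [if_pos (by simp)]
      by_cases hind : n1 = n0 + 1 ∧ n2 = n0 + 2 ∧ n3 = n0 + 3 ∧ n4 = n0 + 4
      · rw [if_pos hind, if_neg hnotin]
        simp [sc, hind]
      · rw [if_neg hind]
        simp [sc, hind]
    · have ht : t.length ≠ 0 := by simpa using hbrk
      rw [if_neg (by simp; omega)]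
      have hrw1 : pre ++ n0 :: n1 :: n2 :: n3 :: n4 :: t = (pre ++ [n0]) ++ n1 :: n2 :: n3 :: n4 :: t := by
        simp
      have hrw2 : ((pre.length : Int) + 1) = (((pre ++ [n0]).length : Nat) : Int) := by
        simp
      set acc' := (if n1 = n0 + 1 ∧ n2 = n0 + 2 ∧ n3 = n0 + 3 ∧ n4 = n0 + 4 then
          if [n0, n1, n2, n3, n4] ∈ acc then acc else acc ++ [[n0, n1, n2, n3, n4]]
        else acc) with hacc'
      have hold : ∀ l ∈ acc, ∃ z, l.head? = some z ∧ ∀ x ∈ n1 :: n2 :: n3 :: n4 :: t, z < x := by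
        intro l hl
        obtain ⟨z, hz, hlt⟩ := hacc l hl
        exact ⟨z, hz, fun x hx => hlt x (by simp at hx ⊢; tauto)⟩
      have hacc'mem : ∀ l ∈ acc', ∃ z, l.head? = some z ∧ ∀ x ∈ n1 :: n2 :: n3 :: n4 :: t, z < x := by
        intro l hl
        rw [hacc'] at hl
        split_ifs at hl
        all_goals first
          | exact hold l hl
          | (rcases List.mem_append.mp hl with h | h
             · exact hold l h
             · simp at h
               subst h
               exact ⟨n0, rfl, hn0⟩)
      have hpw' : ((pre ++ [n0]) ++ n1 :: n2 :: n3 :: n4 :: t).Pairwise (· < ·) := by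
        rw [← hrw1]; exact hpw
      have ihres := ih (pre ++ [n0]) acc' hpw' (by simp; omega) hacc'mem
      rw [hrw1, hrw2, ihres]
      have hlen' : (acc'.length : Int)
          = (acc.length : Int) + (if n1 = n0 + 1 ∧ n2 = n0 + 2 ∧ n3 = n0 + 3 ∧ n4 = n0 + 4 then 1 else 0) := by
        by_cases h1 : n1 = n0 + 1 ∧ n2 = n0 + 2 ∧ n3 = n0 + 3 ∧ n4 = n0 + 4
        · rw [hacc', if_pos h1, if_neg hnotin, if_pos h1]
          simp
        · rw [hacc', if_neg h1, if_neg h1]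
          simp
      rw [hlen', sc]
      ring

-- ===== VERDICT (by name: the statement is the Claim_ definition above) =====
theorem card_spec : Claim_equal_card := by
  intro card_seq card_num _ hpre
  unfold Spec_card card card_alt
  by_cases h5 : card_num < 5
  · simp [h5]
  · rw [if_neg h5, if_neg h5]
    have hne : card_seq ≠ [] := by
      rcases hpre with h | h
      · exact absurd h h5
      · exact h
    have hsne : PySem.List.sorted card_seq (fun x => x) false ≠ [] := by
      simpa [PySem.List.sorted_eq_nil_iff] using hne
    set s := PySem.List.sorted card_seq (fun x => x) false with hs
    obtain ⟨lastv, hlast⟩ : ∃ x, PySem.List.pyGet? s (-1) = some x := by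
      rw [PySem.List.pyGet?_neg_one]
      exact ⟨s.getLast hsne, List.getLast?_eq_some_getLast ..⟩
    obtain ⟨firstv, hfirst⟩ : ∃ x, PySem.List.pyGet? s 0 = some x := by
      rcases s with _ | ⟨x, t⟩
      · exact absurd rfl hsne
      · exact ⟨x, PySem.List.pyGet?_zero_cons ..⟩
    rw [hlast, hfirst]
    dsimp only
    by_cases hg : lastv - firstv < 4
    · simp [hg]
    · rw [if_neg hg, if_neg hg]
      -- the two count-dict folds are the same function
      have hstep : (fun (d : PySem.Dict Int Int) (n : Int) =>
            if d.contains n then d.modify n 0 (· + 1) else d.insert n 1)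
          = (fun (d : PySem.Dict Int Int) (n : Int) => d.insert n (d.getD n 0 + 1)) := by
        funext d n
        by_cases hc : d.contains n
        · rw [if_pos hc]
          simp [PySem.Dict.modify]
        · rw [if_neg hc, PySem.Dict.getD_of_not_contains _ _ (by simpa using hc)]
          norm_num
      rw [hstep]
      set D := s.foldl (fun (d : PySem.Dict Int Int) (n : Int) => d.insert n (d.getD n 0 + 1))
        PySem.Dict.empty with hD
      have hkeys : D.keys = PySem.Set.ofList s := by
        rw [hD, PySem.Dict.foldl_insert_getD_add_one_eq_counter, PySem.Dict.keys_counter]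
      have hprod : D.values.foldl (fun m v => m * v) 1 = D.items.foldl (fun m p => m * p.2) 1 := by
        rw [show D.values = D.items.map (·.2) from rfl, List.foldl_map]
      rw [hkeys, ← hprod]
      set u := PySem.List.sorted (PySem.Set.ofList s) (fun x => x) false with hu
      have hupw : u.Pairwise (· < ·) := PySem.List.sorted_ofList_pairwise_lt ..
      -- B's run scan computes sc u
      have hB : ((u.zip (PySem.List.slice u (some 1) none)).foldl
            (fun (p : Int × Int) (pr : Int × Int) =>
              if pr.2 = pr.1 + 1 then (p.1, p.2 + 1) else (p.1 + max 0 (p.2 - 4), 1))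
            ((0 : Int), (1 : Int))).1
          + max 0 (((u.zip (PySem.List.slice u (some 1) none)).foldl
            (fun (p : Int × Int) (pr : Int × Int) =>
              if pr.2 = pr.1 + 1 then (p.1, p.2 + 1) else (p.1 + max 0 (p.2 - 4), 1))
            ((0 : Int), (1 : Int))).2 - 4) = sc u := by
        rw [PySem.List.slice_from_one, bfold_total (u.zip u.tail) 0 1 le_rfl,
            wcAux_eq _ 1 le_rfl]
        simp [sc_eq_wc]
      rw [hB]
      by_cases hlen : (u.length : Int) < 5
      · rw [if_pos hlen, sc_short u (by omega)]
        ring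
      · rw [if_neg hlen]
        have := aLoop_len u [] [] (by simpa using hupw) (by omega) (by simp)
        simp only [List.nil_append, List.length_nil, Nat.cast_zero, zero_add] at this
        rw [this]
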